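-- pv_equiv track=rewrite | github.com/ketankokane94/FIS_projects | project1/env_analysis_agent.py | checkForRobot
-- ===== SOURCE A (Python) =====
-- def checkForRobot(state, player_x, player_y):
--     for row in range(len(state)):
--         for col in range(len(state[row])):
--             if state[row][col][0] == 55:
--                 #55 is robot
--                 if row == player_x:
--                     return 'y', row, col
--                 if col == player_y:
--                     return 'x', row, col
--     return 'not found', 0, 0
-- ===== SOURCE B (Python) =====
-- def checkForRobot(state, player_x, player_y):
--     # Only the player's row and the player's column can yield a hit, so visit just
--     # state[player_x] (full row) and column player_y of every other row,
--     # preserving A's row-major first-match order.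
--     for r, row in enumerate(state):
--         if r == player_x:
--             for c, cell in enumerate(row):
--                 if cell[0] == 55:
--                     return 'y', r, c
--         elif 0 <= player_y < len(row) and row[player_y][0] == 55:
--             return 'x', r, player_y
--     return 'not found', 0, 0
-- ===== Notes on version B (the rewrite author's own statement) =====
-- stated objective: alternative
-- what changed: Instead of scanning every cell of the grid row-major, B visits only the cells that can actually match: the player's row (for the 'y' case) and the single cell at column player_y in every other row (for the 'x' case), preserving A's row-major first-match order.
-- outside the precondition, e.g. on checkForRobot([[[55], []]], 0, 0): A returns ('y', 0, 0), B returns ('y', 0, 0)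
import Mathlib
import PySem

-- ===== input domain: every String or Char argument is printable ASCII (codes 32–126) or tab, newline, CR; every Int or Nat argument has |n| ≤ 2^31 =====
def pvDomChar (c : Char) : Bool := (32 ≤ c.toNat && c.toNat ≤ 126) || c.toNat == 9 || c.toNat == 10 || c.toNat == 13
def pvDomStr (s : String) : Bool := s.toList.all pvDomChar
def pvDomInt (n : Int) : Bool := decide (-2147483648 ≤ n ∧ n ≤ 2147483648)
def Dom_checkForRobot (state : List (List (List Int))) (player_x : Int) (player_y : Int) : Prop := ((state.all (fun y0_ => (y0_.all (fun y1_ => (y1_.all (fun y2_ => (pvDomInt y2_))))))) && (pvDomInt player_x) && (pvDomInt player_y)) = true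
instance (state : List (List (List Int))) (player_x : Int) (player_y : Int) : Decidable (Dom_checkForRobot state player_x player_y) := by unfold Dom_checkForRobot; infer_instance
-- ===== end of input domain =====

-- ===== PORT A =====
-- B changes the traversal: only the player's row and the player's column are visited.
-- Python indexing state[row][col][0] is rendered as [i]?.getD default; exact on Pre_ (no empty cells) since
-- row/col come from range() and are in range.

-- inner loop: 'for col in range(len(state[row])): ...'
def aColLoop (state : List (List (List Int))) (row : Nat) (px py : Int) : List Nat → Option (String × Int × Int)
  | [] => none
  | col :: rest =>
    if ((state[row]?.getD [])[col]?.getD [])[0]?.getD 0 = 55 then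
      if (row : Int) = px then some ("y", (row : Int), (col : Int))
      else if (col : Int) = py then some ("x", (row : Int), (col : Int))
      else aColLoop state row px py rest
    else aColLoop state row px py rest

-- outer loop: 'for row in range(len(state)): ...'
def aRowLoop (state : List (List (List Int))) (px py : Int) : List Nat → Option (String × Int × Int)
  | [] => none
  | row :: rest =>
    match aColLoop state row px py (List.range (state[row]?.getD []).length) with
    | some v => some v
    | none => aRowLoop state px py rest

def checkForRobot (state : List (List (List Int))) (player_x : Int) (player_y : Int) : String × Int × Int :=
  (aRowLoop state player_x player_y (List.range state.length)).getD ("not found", 0, 0)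

-- ===== PORT B =====
-- 'for c, cell in enumerate(row): if cell[0] == 55: return ...' — first robot column in the player's row
def bFindRobotCol (row : List (List Int)) (c : Nat) : Option Nat :=
  match row with
  | [] => none
  | cell :: rest => if cell[0]?.getD 0 = 55 then some c else bFindRobotCol rest (c + 1)

-- 'for r, row in enumerate(state): ...'
def bRowLoop (px py : Int) (r : Nat) : List (List (List Int)) → Option (String × Int × Int)
  | [] => none
  | row :: rest =>
    if (r : Int) = px then
      match bFindRobotCol row 0 with
      | some c => some ("y", (r : Int), (c : Int))
      | none => bRowLoop px py (r + 1) rest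
    else if 0 ≤ py ∧ py < (row.length : Int) ∧ (row[py.toNat]?.getD [])[0]?.getD 0 = 55 then
      some ("x", (r : Int), py)
    else bRowLoop px py (r + 1) rest

def checkForRobot_alt (state : List (List (List Int))) (player_x : Int) (player_y : Int) : String × Int × Int :=
  (bRowLoop player_x player_y 0 state).getD ("not found", 0, 0)

-- ===== PRECONDITION & SPEC =====
-- Pre_ excludes states containing an empty cell: Python A raises IndexError on 'cell[0]' when its scan
-- reaches such a cell (on some such states A still returns, having found a robot first — see the cite).
def Pre_checkForRobot (state : List (List (List Int))) (player_x : Int) (player_y : Int) : Prop :=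
  ∀ row ∈ state, ∀ cell ∈ row, cell ≠ []
instance (state : List (List (List Int))) (player_x : Int) (player_y : Int) : Decidable (Pre_checkForRobot state player_x player_y) := by unfold Pre_checkForRobot; infer_instance

def pvWitness_checkForRobot : List (List (List Int)) × Int × Int := ([[[55], [1]], [[2]]], 0, 0)

def Spec_checkForRobot (state : List (List (List Int))) (player_x : Int) (player_y : Int) (out : String × Int × Int) : Prop := out = checkForRobot_alt state player_x player_y
instance (state : List (List (List Int))) (player_x : Int) (player_y : Int) (out : String × Int × Int) : Decidable (Spec_checkForRobot state player_x player_y out) := by unfold Spec_checkForRobot; infer_instance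

-- ===== CLAIM (what is proved, stated in full; the proofs are below) =====
def Claim_equal_checkForRobot : Prop := ∀ (state : List (List (List Int))) (player_x : Int) (player_y : Int), Dom_checkForRobot state player_x player_y → Pre_checkForRobot state player_x player_y → Spec_checkForRobot state player_x player_y (checkForRobot state player_x player_y)

-- ===== LEMMAS AND PROOFS =====

theorem drop_cons_get? {α : Type} (l : List α) (c : Nat) (x : α) (rest : List α)
    (h : l.drop c = x :: rest) : l[c]? = some x := by
  have h0 : (l.drop c)[0]? = some x := by rw [h]; rfl
  rw [List.getElem?_drop] at h0
  simpa using h0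

theorem drop_cons_succ {α : Type} (l : List α) (c : Nat) (x : α) (rest : List α)
    (h : l.drop c = x :: rest) : l.drop (c + 1) = rest := by
  have h2 : l.drop (c + 1) = (l.drop c).drop 1 := by rw [List.drop_drop]
  simp [h2, h]

theorem drop_cons_lt {α : Type} (l : List α) (c : Nat) (x : α) (rest : List α)
    (h : l.drop c = x :: rest) : c < l.length := by
  have := congrArg List.length h
  simp at this; omega

-- player's row: the inner scan of A returns 'y' at the first robot column
theorem colLoop_eq_row (state : List (List (List Int))) (r : Nat) (px py : Int)
    (hr : (r : Int) = px) :
    ∀ (suffix : List (List Int)) (c : Nat), (state[r]?.getD []).drop c = suffix →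
      aColLoop state r px py (List.range' c suffix.length) =
        (bFindRobotCol suffix c).map (fun cc => ("y", (r : Int), (cc : Int))) := by
  intro suffix
  induction suffix with
  | nil => intro c _; simp [aColLoop, bFindRobotCol]
  | cons cell rest ih =>
    intro c hdrop
    have hget := drop_cons_get? _ _ _ _ hdrop
    rw [List.length_cons, List.range'_succ]
    simp only [aColLoop, bFindRobotCol, hget, Option.getD_some, hr]
    by_cases h55 : cell[0]?.getD 0 = 55
    · simp [h55]
    · simp [h55, hr, ih (c + 1) (drop_cons_succ _ _ _ _ hdrop)]

-- other rows: the inner scan of A hits exactly the cell at column py, if valid and a robot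
theorem colLoop_eq_col (state : List (List (List Int))) (r : Nat) (px py : Int)
    (hr : (r : Int) ≠ px) :
    ∀ (suffix : List (List Int)) (c : Nat), (state[r]?.getD []).drop c = suffix →
      aColLoop state r px py (List.range' c suffix.length) =
        (if (c : Int) ≤ py ∧ py < ((state[r]?.getD []).length : Int) ∧
            ((state[r]?.getD [])[py.toNat]?.getD [])[0]?.getD 0 = 55
         then some ("x", (r : Int), py) else none) := by
  intro suffix
  induction suffix with
  | nil =>
    intro c hdrop
    have hlen : (state[r]?.getD []).length ≤ c := List.drop_eq_nil_iff.mp hdrop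
    rw [List.length_nil, List.range'_zero]
    rw [show aColLoop state r px py [] = none from rfl, if_neg]
    rintro ⟨h1, h2, _⟩
    omega
  | cons cell rest ih =>
    intro c hdrop
    have hget := drop_cons_get? _ _ _ _ hdrop
    have hclen : c < (state[r]?.getD []).length := drop_cons_lt _ _ _ _ hdrop
    have hrec := ih (c + 1) (drop_cons_succ _ _ _ _ hdrop)
    rw [List.length_cons, List.range'_succ]
    simp only [aColLoop, hget, Option.getD_some]
    by_cases h55 : cell[0]?.getD 0 = 55
    · by_cases hcp : (c : Int) = py
      · have hq : (c : Int) ≤ py ∧ py < ((state[r]?.getD []).length : Int) ∧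
            ((state[r]?.getD [])[py.toNat]?.getD [])[0]?.getD 0 = 55 := by
          refine ⟨le_of_eq hcp, by omega, ?_⟩
          have hc' : py.toNat = c := by omega
          rw [hc', hget, Option.getD_some, h55]
        rw [if_pos h55, if_neg hr, if_pos hcp, if_pos hq, hcp]
      · have hiff : (((c + 1 : Nat) : Int) ≤ py ∧ py < ((state[r]?.getD []).length : Int) ∧
            ((state[r]?.getD [])[py.toNat]?.getD [])[0]?.getD 0 = 55) ↔
            ((c : Int) ≤ py ∧ py < ((state[r]?.getD []).length : Int) ∧
            ((state[r]?.getD [])[py.toNat]?.getD [])[0]?.getD 0 = 55) := by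
          constructor
          · rintro ⟨h1, h2, h3⟩; exact ⟨by omega, h2, h3⟩
          · rintro ⟨h1, h2, h3⟩; exact ⟨by omega, h2, h3⟩
        rw [if_pos h55, if_neg hr, if_neg hcp, hrec]
        exact if_congr hiff rfl rfl
    · have hiff : (((c + 1 : Nat) : Int) ≤ py ∧ py < ((state[r]?.getD []).length : Int) ∧
          ((state[r]?.getD [])[py.toNat]?.getD [])[0]?.getD 0 = 55) ↔
          ((c : Int) ≤ py ∧ py < ((state[r]?.getD []).length : Int) ∧
          ((state[r]?.getD [])[py.toNat]?.getD [])[0]?.getD 0 = 55) := by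
        constructor
        · rintro ⟨h1, h2, h3⟩; exact ⟨by omega, h2, h3⟩
        · rintro ⟨h1, h2, h3⟩
          refine ⟨?_, h2, h3⟩
          by_cases hcp : (c : Int) = py
          · exfalso
            have hc' : py.toNat = c := by omega
            rw [hc', hget, Option.getD_some] at h3
            exact h55 h3
          · omega
      rw [if_neg h55, hrec]
      exact if_congr hiff rfl rfl

theorem rowLoop_eq (state : List (List (List Int))) (px py : Int) :
    ∀ (suffix : List (List (List Int))) (r : Nat), state.drop r = suffix →
      aRowLoop state px py (List.range' r suffix.length) = bRowLoop px py r suffix := by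
  intro suffix
  induction suffix with
  | nil => intro r _; simp [aRowLoop, bRowLoop]
  | cons row rest ih =>
    intro r hdrop
    have hget := drop_cons_get? _ _ _ _ hdrop
    have hrec := ih (r + 1) (drop_cons_succ _ _ _ _ hdrop)
    rw [List.length_cons, List.range'_succ]
    simp only [aRowLoop, bRowLoop]
    rw [List.range_eq_range']
    by_cases hr : (r : Int) = px
    · rw [colLoop_eq_row state r px py hr (state[r]?.getD []) 0 (by simp)]
      rw [if_pos hr, hget]
      simp only [Option.getD_some]
      rcases hfb : bFindRobotCol row 0 with _ | c
      · simp [hrec]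
      · simp
    · rw [colLoop_eq_col state r px py hr (state[r]?.getD []) 0 (by simp)]
      rw [if_neg hr, hget]
      simp only [Option.getD_some, Nat.cast_zero]
      split_ifs with hcond
      · rfl
      · exact hrec

-- ===== VERDICT (by name: the statement is the Claim_ definition above) =====
theorem checkForRobot_spec : Claim_equal_checkForRobot := by
  intro state px py _ _
  unfold Spec_checkForRobot checkForRobot checkForRobot_alt
  rw [List.range_eq_range', rowLoop_eq state px py state 0 (by simp)]
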